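-- pv_equiv track=rewrite | github.com/nyucel/blm2010 | vize/180401076.py | x_y_hesapla
-- ===== SOURCE A (Python) =====
-- def x_y_hesapla(genislik,list1):
--     xi_yi_toplam = []
--     xi_yi_toplam.append(sum(list1))
--     for i in range(1, 7, 1):
--         deger=0
--         for j in range(genislik):
--             deger += (j + 1) ** i * list1[j]
--         xi_yi_toplam.append(deger)
--     return xi_yi_toplam
-- ===== SOURCE B (Python) =====
-- def x_y_hesapla(genislik, list1):
--     s1 = s2 = s3 = s4 = s5 = s6 = 0
--     for j in range(genislik):
--         b = j + 1
--         p = b * list1[j]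
--         s1 += p
--         p *= b
--         s2 += p
--         p *= b
--         s3 += p
--         p *= b
--         s4 += p
--         p *= b
--         s5 += p
--         p *= b
--         s6 += p
--     return [sum(list1), s1, s2, s3, s4, s5, s6]
-- ===== Notes on version B (the rewrite author's own statement) =====
-- stated objective: faster
-- what changed: Replaces six separate passes (one per exponent, each recomputing (j+1)**i from scratch) by a single pass over range(genislik) that maintains six running sums, advancing the power by one multiplication per step.
import Mathlib
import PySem

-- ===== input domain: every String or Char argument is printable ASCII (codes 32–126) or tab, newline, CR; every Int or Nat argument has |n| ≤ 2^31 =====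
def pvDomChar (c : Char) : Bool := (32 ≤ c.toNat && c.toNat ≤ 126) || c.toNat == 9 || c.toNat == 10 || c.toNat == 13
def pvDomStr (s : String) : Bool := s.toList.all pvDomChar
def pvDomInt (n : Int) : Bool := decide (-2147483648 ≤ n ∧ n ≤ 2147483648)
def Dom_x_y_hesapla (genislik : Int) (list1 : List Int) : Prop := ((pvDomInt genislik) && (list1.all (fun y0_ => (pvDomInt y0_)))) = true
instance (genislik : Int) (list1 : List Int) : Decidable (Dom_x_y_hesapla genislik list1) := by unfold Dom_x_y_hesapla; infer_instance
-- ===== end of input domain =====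

-- B fuses A's six per-exponent passes into one pass keeping six running sums (objective: faster, constant-factor).


-- ===== PORT A =====
-- list1[j] is PySem.List.pyGetD _ j 0; Pre_ restricts to inputs where Python never raises IndexError,
-- so the default is never reached there.
def x_y_hesapla (genislik : Int) (list1 : List Int) : List Int :=
  let xi_yi_toplam : List Int := []
  let xi_yi_toplam := xi_yi_toplam ++ [list1.sum]
  (PySem.List.pyRange 1 7 1).foldl
    (fun xi_yi_toplam i =>
      let deger : Int :=
        (PySem.List.pyRange 0 genislik 1).foldl
          (fun deger j => deger + (j + 1) ^ i.toNat * PySem.List.pyGetD list1 j 0) 0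
      xi_yi_toplam ++ [deger])
    xi_yi_toplam

-- ===== PORT B =====
def x_y_hesapla_alt (genislik : Int) (list1 : List Int) : List Int :=
  let s :=
    (PySem.List.pyRange 0 genislik 1).foldl
      (fun (s : Int × Int × Int × Int × Int × Int) j =>
        let b := j + 1
        let p := b * PySem.List.pyGetD list1 j 0
        let s1 := s.1 + p
        let p := p * b
        let s2 := s.2.1 + p
        let p := p * b
        let s3 := s.2.2.1 + p
        let p := p * b
        let s4 := s.2.2.2.1 + p
        let p := p * b
        let s5 := s.2.2.2.2.1 + p
        let p := p * b
        let s6 := s.2.2.2.2.2 + p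
        (s1, s2, s3, s4, s5, s6))
      (0, 0, 0, 0, 0, 0)
  [list1.sum, s.1, s.2.1, s.2.2.1, s.2.2.2.1, s.2.2.2.2.1, s.2.2.2.2.2]

-- ===== PRECONDITION & SPEC =====
-- Pre_ excludes exactly the inputs where Python's list1[j] raises IndexError (genislik > len(list1)).
def Pre_x_y_hesapla (genislik : Int) (list1 : List Int) : Prop := genislik ≤ (list1.length : Int)
instance (genislik : Int) (list1 : List Int) : Decidable (Pre_x_y_hesapla genislik list1) := by unfold Pre_x_y_hesapla; infer_instance
def pvWitness_x_y_hesapla : Int × List Int := (3, [2, -1, 4])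

def Spec_x_y_hesapla (genislik : Int) (list1 : List Int) (out : List Int) : Prop := out = x_y_hesapla_alt genislik list1
instance (genislik : Int) (list1 : List Int) (out : List Int) : Decidable (Spec_x_y_hesapla genislik list1 out) := by unfold Spec_x_y_hesapla; infer_instance

-- ===== CLAIM (what is proved, stated in full; the proofs are below) =====
def Claim_equal_x_y_hesapla : Prop := ∀ (genislik : Int) (list1 : List Int), Dom_x_y_hesapla genislik list1 → Pre_x_y_hesapla genislik list1 → Spec_x_y_hesapla genislik list1 (x_y_hesapla genislik list1)

-- ===== LEMMAS AND PROOFS =====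

-- A's inner accumulation is init plus a mapped sum.
theorem foldl_add_map_sum (f : Int → Int) (l : List Int) (c : Int) :
    l.foldl (fun d j => d + f j) c = c + (l.map f).sum := by
  induction l generalizing c with
  | nil => simp
  | cons x xs ih => simp [ih, add_assoc]

-- B's single fold computes, componentwise, the six mapped sums.
theorem bfold_eq (list1 : List Int) (l : List Int) (s1 s2 s3 s4 s5 s6 : Int) :
    l.foldl
      (fun (s : Int × Int × Int × Int × Int × Int) j =>
        let b := j + 1
        let p := b * PySem.List.pyGetD list1 j 0
        let s1 := s.1 + p
        let p := p * b
        let s2 := s.2.1 + p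
        let p := p * b
        let s3 := s.2.2.1 + p
        let p := p * b
        let s4 := s.2.2.2.1 + p
        let p := p * b
        let s5 := s.2.2.2.2.1 + p
        let p := p * b
        let s6 := s.2.2.2.2.2 + p
        (s1, s2, s3, s4, s5, s6))
      (s1, s2, s3, s4, s5, s6)
    = (s1 + (l.map (fun j => (j + 1) ^ 1 * PySem.List.pyGetD list1 j 0)).sum,
       s2 + (l.map (fun j => (j + 1) ^ 2 * PySem.List.pyGetD list1 j 0)).sum,
       s3 + (l.map (fun j => (j + 1) ^ 3 * PySem.List.pyGetD list1 j 0)).sum,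
       s4 + (l.map (fun j => (j + 1) ^ 4 * PySem.List.pyGetD list1 j 0)).sum,
       s5 + (l.map (fun j => (j + 1) ^ 5 * PySem.List.pyGetD list1 j 0)).sum,
       s6 + (l.map (fun j => (j + 1) ^ 6 * PySem.List.pyGetD list1 j 0)).sum) := by
  induction l generalizing s1 s2 s3 s4 s5 s6 with
  | nil => simp
  | cons x xs ih =>
    simp only [List.foldl_cons, List.map_cons, List.sum_cons, ih]
    refine Prod.ext ?_ (Prod.ext ?_ (Prod.ext ?_ (Prod.ext ?_ (Prod.ext ?_ ?_)))) <;> ring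

-- ===== VERDICT (by name: the statement is the Claim_ definition above) =====
theorem x_y_hesapla_spec : Claim_equal_x_y_hesapla := by
  intro genislik list1 _ _
  show x_y_hesapla genislik list1 = x_y_hesapla_alt genislik list1
  have h7 : PySem.List.pyRange 1 7 1 = [1, 2, 3, 4, 5, 6] := by decide
  simp only [x_y_hesapla, x_y_hesapla_alt, h7, List.foldl_cons, List.foldl_nil,
    foldl_add_map_sum, bfold_eq]
  norm_num [show (2:Int).toNat = 2 from rfl, show (3:Int).toNat = 3 from rfl,
    show (4:Int).toNat = 4 from rfl, show (5:Int).toNat = 5 from rfl, show (6:Int).toNat = 6 from rfl]
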